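-- pv_equiv track=rewrite | github.com/sdheenr/Auto_Insta | insta_download-22.py | parse_profiles_from_cli
-- ===== SOURCE A (Python) =====
-- def parse_profiles_from_cli(argv):
--     items = []
--     for tok in argv:
--         if "," in tok:
--             items.extend([p.strip() for p in tok.split(",") if p.strip()])
--         else:
--             tok = tok.strip()
--             if tok:
--                 items.append(tok)
--     return [p for p in items if p]
-- ===== SOURCE B (Python) =====
-- def parse_profiles_from_cli(argv):
--     joined = ",".join(argv)
--     return [p.strip() for p in joined.split(",") if p.strip()]
-- ===== Notes on version B (the rewrite author's own statement) =====
-- stated objective: simpler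
-- what changed: B joins all argv tokens into one comma-separated string and does a single uniform split/strip/filter pass, removing A's per-token comma test, two-way branch, accumulator list and final re-filter.
import Mathlib
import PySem

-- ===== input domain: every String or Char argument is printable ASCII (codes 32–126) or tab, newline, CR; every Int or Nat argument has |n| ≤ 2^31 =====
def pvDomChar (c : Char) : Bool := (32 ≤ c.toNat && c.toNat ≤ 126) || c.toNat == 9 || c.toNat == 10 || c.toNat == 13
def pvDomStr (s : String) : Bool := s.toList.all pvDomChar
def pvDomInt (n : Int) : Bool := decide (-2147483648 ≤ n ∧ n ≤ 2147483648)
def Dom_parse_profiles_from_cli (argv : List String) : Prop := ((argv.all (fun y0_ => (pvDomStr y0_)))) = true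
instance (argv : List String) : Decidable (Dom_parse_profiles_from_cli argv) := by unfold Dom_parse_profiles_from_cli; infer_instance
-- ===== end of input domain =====

-- B joins argv into one comma-separated string and does a single split/strip/filter pass,
-- replacing A's per-token comma branch, accumulator and final re-filter (objective: simpler).

-- ===== PORT A =====
-- tok.split(",") with the literal nonempty separator ",": PySem.Str.split? is none only for
-- an empty separator, so `.getD []` is never taken and the port is exact.
def parse_profiles_from_cli (argv : List String) : List String :=
  let items : List String := argv.foldl (fun items tok =>
    if PySem.Str.isIn "," tok then
      items ++ ((((PySem.Str.split? tok ",").getD []).filter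
          (fun p => PySem.Str.strip p ≠ "")).map PySem.Str.strip)
    else
      let tok := PySem.Str.strip tok
      if tok ≠ "" then items ++ [tok] else items) []
  items.filter (fun p => p ≠ "")

-- ===== PORT B =====
def parse_profiles_from_cli_alt (argv : List String) : List String :=
  let joined := PySem.Str.join "," argv
  (((PySem.Str.split? joined ",").getD []).filter
      (fun p => PySem.Str.strip p ≠ "")).map PySem.Str.strip

-- ===== PRECONDITION & SPEC =====
def Spec_parse_profiles_from_cli (argv : List String) (out : List String) : Prop := out = parse_profiles_from_cli_alt argv
instance (argv : List String) (out : List String) : Decidable (Spec_parse_profiles_from_cli argv out) := by unfold Spec_parse_profiles_from_cli; infer_instance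

-- ===== CLAIM (what is proved, stated in full; the proofs are below) =====
def Claim_equal_parse_profiles_from_cli : Prop := ∀ (argv : List String), Dom_parse_profiles_from_cli argv → Spec_parse_profiles_from_cli argv (parse_profiles_from_cli argv)

-- ===== LEMMAS AND PROOFS =====

-- A simple structural description of splitting a char list at commas (proof helper only).
def psplit : List Char → List Char → List (List Char)
  | [], cur => [cur.reverse]
  | x :: rest, cur => if x = ',' then cur.reverse :: psplit rest [] else psplit rest (x :: cur)

theorem psplit_go (fuel : Nat) : ∀ (l cur : List Char) (acc : List (List Char)),
    l.length < fuel →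
    PySem.Chars.splitOn.go [','] fuel l cur acc = acc.reverse ++ psplit l cur := by
  induction fuel with
  | zero => intro l cur acc h; omega
  | succ n ih =>
    intro l cur acc h
    cases l with
    | nil => simp [PySem.Chars.splitOn.go, psplit]
    | cons c rest =>
      simp only [PySem.Chars.splitOn.go, List.isPrefixOf, List.length_cons] at *
      by_cases hc : c = ','
      · subst hc
        rw [if_pos (by simp)]
        have hdrop : List.drop (List.length ([] : List Char) + 1) (',' :: rest) = rest := by simp
        rw [hdrop, ih rest [] (cur.reverse :: acc) (by omega)]
        simp [psplit]
      · rw [if_neg (by simp; exact fun h' => hc h'.symm)]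
        rw [ih rest (c :: cur) acc (by omega)]
        simp [psplit, hc]

theorem splitOn_eq_psplit (l : List Char) :
    PySem.Chars.splitOn l [','] = psplit l [] := by
  unfold PySem.Chars.splitOn
  rw [psplit_go (l.length + 1) l [] [] (by omega)]
  simp

theorem psplit_append (s1 : List Char) : ∀ (s2 cur : List Char),
    psplit (s1 ++ ',' :: s2) cur = psplit s1 cur ++ psplit s2 [] := by
  induction s1 with
  | nil => intro s2 cur; simp [psplit]
  | cons x rest ih =>
    intro s2 cur
    by_cases hx : x = ','
    · subst hx; simp only [List.cons_append, psplit, ih]; rfl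
    · simp only [List.cons_append, psplit, if_neg hx, ih]

theorem psplit_no_comma (l : List Char) (h : ',' ∉ l) : ∀ cur, psplit l cur = [cur.reverse ++ l] := by
  induction l with
  | nil => intro cur; simp [psplit]
  | cons x rest ih =>
    intro cur
    have hx : x ≠ ',' := fun hxe => h (hxe ▸ List.mem_cons_self)
    have hr : ',' ∉ rest := fun hm => h (List.mem_cons_of_mem _ hm)
    simp [psplit, hx, ih hr]

-- split of join: splitting the joined string is the concatenation of the per-token splits
theorem psplit_join (x : List Char) : ∀ (xs : List (List Char)),
    psplit (PySem.Chars.join [','] (x :: xs)) [] =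
      psplit x [] ++ xs.flatMap (fun t => psplit t []) := by
  intro xs
  induction xs generalizing x with
  | nil => simp [PySem.Chars.join_singleton]
  | cons y ys ih =>
    rw [PySem.Chars.join_cons_cons, List.append_assoc, List.singleton_append,
      psplit_append, ih]
    simp

-- shared cleanup pass: keep the pieces whose strip is nonempty, stripped
def cleanC (l : List (List Char)) : List String :=
  (l.filter (fun p => PySem.Chars.strip p ≠ [])).map (fun p => String.ofList (PySem.Chars.strip p))

theorem cleanC_append (l1 l2 : List (List Char)) :
    cleanC (l1 ++ l2) = cleanC l1 ++ cleanC l2 := by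
  simp [cleanC]

-- the Str-level split/strip/filter pass equals cleanC on toList
theorem pass_eq_cleanC (s : String) :
    (((PySem.Str.split? s ",").getD []).filter (fun p => PySem.Str.strip p ≠ "")).map
        PySem.Str.strip = cleanC (psplit s.toList []) := by
  have : PySem.Str.split? s "," = some ((psplit s.toList []).map String.ofList) := by
    simp [PySem.Str.split?, PySem.Chars.split?, splitOn_eq_psplit]
  rw [this]
  simp only [Option.getD_some, cleanC, List.filter_map, List.map_map]
  have hp : ((fun p => decide (PySem.Str.strip p ≠ "")) ∘ String.ofList)
      = (fun p : List Char => decide (PySem.Chars.strip p ≠ [])) := by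
    funext p
    simp only [Function.comp]
    apply decide_eq_decide.mpr
    simp [PySem.Str.strip, String.ext_iff]
  have hm : (PySem.Str.strip ∘ String.ofList)
      = (fun p : List Char => String.ofList (PySem.Chars.strip p)) := by
    funext p
    simp [Function.comp, PySem.Str.strip]
  rw [hp, hm]

-- A's per-token branch always produces exactly cleanC of the comma-split of the token
theorem branch_eq (items : List String) (tok : String) :
    (if PySem.Str.isIn "," tok then
      items ++ ((((PySem.Str.split? tok ",").getD []).filter
          (fun p => PySem.Str.strip p ≠ "")).map PySem.Str.strip)
    else
      let t := PySem.Str.strip tok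
      if t ≠ "" then items ++ [t] else items) = items ++ cleanC (psplit tok.toList []) := by
  by_cases h : PySem.Str.isIn "," tok
  · rw [if_pos h, pass_eq_cleanC]
  · rw [if_neg h]
    have hmem : ',' ∉ tok.toList := by
      intro hm
      exact h (by
        have : PySem.Chars.isIn [','] tok.toList = true :=
          (PySem.Chars.isIn_iff_infix _ _).mpr ((List.singleton_infix_iff _ _).mpr hm)
        simpa [PySem.Str.isIn] using this)
    rw [psplit_no_comma tok.toList hmem []]
    simp only [List.reverse_nil, List.nil_append, cleanC]
    by_cases hs : PySem.Chars.strip tok.toList = []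
    · simp [hs, PySem.Str.strip]
    · simp [hs, PySem.Str.strip, String.ext_iff]

theorem A_foldl (argv : List String) : ∀ (items : List String),
    argv.foldl (fun items tok =>
      if PySem.Str.isIn "," tok then
        items ++ ((((PySem.Str.split? tok ",").getD []).filter
            (fun p => PySem.Str.strip p ≠ "")).map PySem.Str.strip)
      else
        let tok := PySem.Str.strip tok
        if tok ≠ "" then items ++ [tok] else items) items
      = items ++ argv.flatMap (fun tok => cleanC (psplit tok.toList [])) := by
  induction argv with
  | nil => intro items; simp
  | cons x xs ih =>
    intro items
    simp only [List.foldl_cons, List.flatMap_cons]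
    rw [branch_eq, ih, List.append_assoc]

theorem mem_cleanC_ne_empty (p : String) (l : List (List Char)) (h : p ∈ cleanC l) : p ≠ "" := by
  simp only [cleanC, List.mem_map, List.mem_filter] at h
  obtain ⟨q, ⟨_, hq⟩, rfl⟩ := h
  simp only [ne_eq, String.ext_iff, String.toList_ofList]
  simpa using hq

theorem A_eq (argv : List String) :
    parse_profiles_from_cli argv = argv.flatMap (fun tok => cleanC (psplit tok.toList [])) := by
  unfold parse_profiles_from_cli
  rw [A_foldl argv []]
  simp only [List.nil_append]
  apply List.filter_eq_self.mpr
  intro p hp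
  simp only [List.mem_flatMap] at hp
  obtain ⟨tok, _, hmem⟩ := hp
  simpa using mem_cleanC_ne_empty p _ hmem

theorem flatMap_cleanC (xs : List String) :
    xs.flatMap (fun tok => cleanC (psplit tok.toList []))
      = cleanC ((xs.map String.toList).flatMap (fun t => psplit t [])) := by
  induction xs with
  | nil => simp [cleanC]
  | cons y ys ih => simp only [List.map_cons, List.flatMap_cons, cleanC_append, ih]

theorem B_eq (argv : List String) :
    parse_profiles_from_cli_alt argv = cleanC (psplit (PySem.Chars.join [','] (argv.map String.toList)) []) := by
  unfold parse_profiles_from_cli_alt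
  rw [pass_eq_cleanC]
  congr 2
  simp [PySem.Str.join]

-- ===== VERDICT (by name: the statement is the Claim_ definition above) =====
theorem parse_profiles_from_cli_spec : Claim_equal_parse_profiles_from_cli := by
  intro argv _
  unfold Spec_parse_profiles_from_cli
  rw [A_eq, B_eq]
  cases argv with
  | nil => simp [PySem.Chars.join_nil, psplit, cleanC, PySem.Chars.strip, PySem.Chars.lstrip, PySem.Chars.rstrip]
  | cons x xs =>
    rw [List.map_cons, psplit_join, cleanC_append, ← flatMap_cleanC]
    simp only [List.flatMap_cons]
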